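-- pv_equiv track=rewrite | github.com/cook1e-0707/tokenizer-evidence | scripts/generate_baseline_null_input.py | _organic_values
-- ===== SOURCE A (Python) =====
-- def _organic_values(slot_count: int) -> list[str]:
--     phrases = (
--         "This prompt asks for a general explanation.",
--         "No ownership evidence is present in this organic answer.",
--         "The response avoids structured carrier fields.",
--         "This sentence is intentionally outside the compiled carrier catalog.",
--     )
--     return [phrases[index % len(phrases)] for index in range(slot_count)]
-- ===== SOURCE B (Python) =====
-- def _organic_values(slot_count: int) -> list[str]:
--     phrases = (
--         "This prompt asks for a general explanation.",
--         "No ownership evidence is present in this organic answer.",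
--         "The response avoids structured carrier fields.",
--         "This sentence is intentionally outside the compiled carrier catalog.",
--     )
--     q, r = divmod(max(slot_count, 0), 4)
--     return list(phrases) * q + list(phrases[:r])
-- ===== Notes on version B (the rewrite author's own statement) =====
-- stated objective: simpler
-- what changed: Replaces the per-element modular-index comprehension over range(slot_count) with a divmod block construction: replicate the full phrase tuple q times and append the first r phrases, after clamping negative counts to 0.
import Mathlib
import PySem

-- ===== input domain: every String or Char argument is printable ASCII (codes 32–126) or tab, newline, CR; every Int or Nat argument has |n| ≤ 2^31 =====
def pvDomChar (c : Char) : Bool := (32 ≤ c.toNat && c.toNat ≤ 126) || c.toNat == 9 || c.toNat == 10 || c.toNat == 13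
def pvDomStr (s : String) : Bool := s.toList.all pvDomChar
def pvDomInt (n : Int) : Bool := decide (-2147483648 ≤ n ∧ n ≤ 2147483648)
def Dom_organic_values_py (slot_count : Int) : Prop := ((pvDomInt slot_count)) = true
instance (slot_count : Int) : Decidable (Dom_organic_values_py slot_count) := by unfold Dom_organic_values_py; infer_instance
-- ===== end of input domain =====

-- B replaces the per-element modular-index comprehension with divmod block replication plus a partial take (simpler decomposition; same cost).


-- ===== PORT A =====
def pvPhrasesA : List String :=
  [ "This prompt asks for a general explanation.",
    "No ownership evidence is present in this organic answer.",
    "The response avoids structured carrier fields.",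
    "This sentence is intentionally outside the compiled carrier catalog." ]

-- [phrases[index % len(phrases)] for index in range(slot_count)]; index % 4 is always in range, so pyGetD is exact here
def organic_values_py (slot_count : Int) : List String :=
  (PySem.List.pyRange 0 slot_count 1).map
    (fun index => PySem.List.pyGetD pvPhrasesA (PySem.Int.mod index (pvPhrasesA.length : Int)) "")

-- ===== PORT B =====
def pvPhrasesB : List String :=
  [ "This prompt asks for a general explanation.",
    "No ownership evidence is present in this organic answer.",
    "The response avoids structured carrier fields.",
    "This sentence is intentionally outside the compiled carrier catalog." ]

-- q, r = divmod(max(slot_count, 0), 4); list(phrases) * q + list(phrases[:r])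
def organic_values_py_alt (slot_count : Int) : List String :=
  let n := max slot_count 0
  let q := PySem.Int.floordiv n 4
  let r := PySem.Int.mod n 4
  (List.replicate q.toNat pvPhrasesB).flatten ++ pvPhrasesB.take r.toNat

-- ===== PRECONDITION & SPEC =====
def Spec_organic_values_py (slot_count : Int) (out : List String) : Prop := out = organic_values_py_alt slot_count
instance (slot_count : Int) (out : List String) : Decidable (Spec_organic_values_py slot_count out) := by unfold Spec_organic_values_py; infer_instance

-- ===== CLAIM (what is proved, stated in full; the proofs are below) =====
def Claim_equal_organic_values_py : Prop := ∀ (slot_count : Int), Dom_organic_values_py slot_count → Spec_organic_values_py slot_count (organic_values_py slot_count)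

-- ===== LEMMAS AND PROOFS =====

lemma pv_f_nat (k : Nat) :
    PySem.List.pyGetD pvPhrasesA (PySem.Int.mod (k : Int) ((pvPhrasesA.length : Nat) : Int)) "" =
      pvPhrasesA.getD (k % 4) "" := by
  rw [show ((pvPhrasesA.length : Nat) : Int) = ((4 : Nat) : Int) by norm_num [pvPhrasesA]]
  rw [PySem.Int.mod_natCast k 4, PySem.List.pyGetD_natCast]

lemma pv_key (n : Nat) :
    (List.range n).map (fun k => pvPhrasesA.getD (k % 4) "") =
      (List.replicate (n / 4) pvPhrasesB).flatten ++ pvPhrasesB.take (n % 4) := by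
  induction n with
  | zero => simp
  | succ n ih =>
    rw [List.range_succ, List.map_append, ih, List.map_singleton]
    have h4 : n % 4 < 4 := Nat.mod_lt _ (by omega)
    interval_cases h : n % 4 <;>
      · have hq : (n + 1) / 4 = n / 4 + (n % 4) / 3 := by omega
        have hr : (n + 1) % 4 = (n % 4 + 1) % 4 := by omega
        rw [hq, hr, h]
        simp [pvPhrasesA, pvPhrasesB, List.replicate_succ', List.flatten_append, List.append_assoc]

-- ===== VERDICT (by name: the statement is the Claim_ definition above) =====
theorem organic_values_py_spec : Claim_equal_organic_values_py := by
  intro slot_count _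
  unfold Spec_organic_values_py organic_values_py organic_values_py_alt
  by_cases h : slot_count ≤ 0
  · rw [PySem.List.pyRange_one_eq_nil h]
    have hm : max slot_count 0 = 0 := by omega
    simp [hm, PySem.Int.floordiv, PySem.Int.mod]
  · push Not at h
    obtain ⟨n, rfl⟩ : ∃ n : Nat, slot_count = (n : Int) :=
      ⟨slot_count.toNat, by omega⟩
    have hm : max ((n : Int)) 0 = ((n : Nat) : Int) := by omega
    rw [hm]
    dsimp only
    rw [show (4 : Int) = ((4 : Nat) : Int) by norm_num,
        PySem.Int.floordiv_natCast n 4, PySem.Int.mod_natCast n 4]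
    rw [PySem.List.pyRange_zero_nat]
    simp only [List.map_map, Int.toNat_natCast]
    calc (List.range n).map ((fun index => PySem.List.pyGetD pvPhrasesA (PySem.Int.mod index (pvPhrasesA.length : Int)) "") ∘ (fun k : Nat => (k : Int)))
        = (List.range n).map (fun k => pvPhrasesA.getD (k % 4) "") := by
          refine List.map_congr_left (fun k _ => ?_)
          simpa using pv_f_nat k
      _ = _ := pv_key n
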